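-- pv_equiv track=rewrite | github.com/MichaelBoyo/c11-code-war | main.py | get
-- ===== SOURCE A (Python) =====
-- def get(arr):
--     even = 0
--     odd = 0
--     enenNo = None
--     oddNo = None
--     for i in arr:
--         if i % 2 == 0:
--             even += 1
--             enenNo = i
--         else:
--             oddNo = i
--             odd += 1
--
--     if even == 1:
--         return enenNo
--     else:
--         return oddNo
-- ===== SOURCE B (Python) =====
-- def get(arr):
--     evens = sum(1 for i in arr if i % 2 == 0)
--     if evens == 1:
--         return next(i for i in arr if i % 2 == 0)
--     for i in reversed(arr):
--         if i % 2 != 0: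
--             return i
--     return None
-- ===== Notes on version B (the rewrite author's own statement) =====
-- stated objective: alternative
-- what changed: Replaces A's single pass maintaining four accumulators (two counters, two last-seen scalars) by a counting pass followed by early-exit searches: a forward first-match for the unique even, or a reversed scan that returns at the first odd element.
-- outside the precondition, e.g. on get([2, 4]): A returns None, B returns None
import Mathlib
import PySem

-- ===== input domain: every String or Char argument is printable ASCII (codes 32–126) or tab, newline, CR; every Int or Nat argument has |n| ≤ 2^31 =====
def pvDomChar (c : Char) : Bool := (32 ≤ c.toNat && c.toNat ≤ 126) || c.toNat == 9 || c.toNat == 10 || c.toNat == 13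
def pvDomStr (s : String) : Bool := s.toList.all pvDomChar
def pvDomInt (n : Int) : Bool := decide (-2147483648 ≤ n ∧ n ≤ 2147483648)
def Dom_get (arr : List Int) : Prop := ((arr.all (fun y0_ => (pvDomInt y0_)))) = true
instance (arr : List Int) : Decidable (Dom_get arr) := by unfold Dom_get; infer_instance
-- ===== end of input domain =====

-- B replaces A's one-pass four-accumulator bookkeeping by a counting pass plus
-- early-exit searches (forward first-match / reversed scan) (objective: alternative).

-- ===== PORT A =====
-- single loop maintaining (even count, odd count, last even, last odd)
def getStep (s : Int × Int × Option Int × Option Int) (i : Int) :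
    Int × Int × Option Int × Option Int :=
  if PySem.Int.mod i 2 = 0 then (s.1 + 1, s.2.1, some i, s.2.2.2)
  else (s.1, s.2.1 + 1, s.2.2.1, some i)

def get (arr : List Int) : Int :=
  let s := arr.foldl getStep (0, 0, none, none)
  -- A returns None when even ≠ 1 and the array has no odd element; Pre_get excludes that,
  -- and the port returns 0 there (outside the claim).
  if s.1 = 1 then s.2.2.1.getD 0 else s.2.2.2.getD 0

-- ===== PORT B =====
def get_alt (arr : List Int) : Int :=
  let evens : Int := arr.foldl (fun n i => if PySem.Int.mod i 2 = 0 then n + 1 else n) 0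
  if evens = 1 then (arr.find? (fun i => PySem.Int.mod i 2 = 0)).getD 0
  else
    match arr.reverse.find? (fun i => PySem.Int.mod i 2 ≠ 0) with
    | some i => i
    | none => 0  -- Python returns None here; excluded by Pre_get

-- ===== PRECONDITION & SPEC =====
-- Pre_ excludes exactly the inputs on which A returns None (not an Int): no odd element
-- and the number of even elements differs from 1.
def Pre_get (arr : List Int) : Prop :=
  (arr.filter (fun i => i % 2 = 0)).length = 1 ∨ (∃ i ∈ arr, i % 2 ≠ 0)
instance (arr : List Int) : Decidable (Pre_get arr) := by unfold Pre_get; infer_instance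

def pvWitness_get : List Int := [2, 3, 5]

def Spec_get (arr : List Int) (out : Int) : Prop := out = get_alt arr
instance (arr : List Int) (out : Int) : Decidable (Spec_get arr out) := by unfold Spec_get; infer_instance

-- ===== CLAIM (what is proved, stated in full; the proofs are below) =====
def Claim_equal_get : Prop := ∀ (arr : List Int), Dom_get arr → Pre_get arr → Spec_get arr (get arr)

-- ===== LEMMAS AND PROOFS =====

theorem getLast?_cons_or {α : Type} (x : α) (l : List α) (en : Option α) :
    ((x :: l).getLast?).or en = (l.getLast?).or (some x) := by
  cases l with
  | nil => simp
  | cons y ys =>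
    rw [List.getLast?_cons_cons]
    cases h : (y :: ys).getLast? with
    | none => simp at h
    | some v => simp [Option.or]

theorem getStep_inv (arr : List Int) (e o : Int) (en od : Option Int) :
    arr.foldl getStep (e, o, en, od) =
      (e + (arr.filter (fun i => PySem.Int.mod i 2 = 0)).length,
       o + (arr.filter (fun i => PySem.Int.mod i 2 ≠ 0)).length,
       ((arr.filter (fun i => PySem.Int.mod i 2 = 0)).getLast?).or en,
       ((arr.filter (fun i => PySem.Int.mod i 2 ≠ 0)).getLast?).or od) := by
  induction arr generalizing e o en od with
  | nil => simp
  | cons x xs ih =>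
    simp only [List.foldl_cons, List.filter_cons]
    by_cases h : PySem.Int.mod x 2 = 0
    · simp only [getStep, h, decide_true, ne_eq, not_true_eq_false, decide_false,
        if_true, Bool.false_eq_true, if_false, ih, List.length_cons, getLast?_cons_or,
        Prod.mk.injEq]
      and_intros <;> first | (push_cast; ring) | rfl | trivial
    · simp only [getStep, h, decide_false, ne_eq, not_false_eq_true, decide_true,
        if_true, Bool.false_eq_true, if_false, ih, List.length_cons, getLast?_cons_or,
        Prod.mk.injEq]
      and_intros <;> first | (push_cast; ring) | rfl | trivial

theorem count_inv (arr : List Int) (n : Int) :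
    arr.foldl (fun n i => if PySem.Int.mod i 2 = 0 then n + 1 else n) n =
      n + (arr.filter (fun i => PySem.Int.mod i 2 = 0)).length := by
  induction arr generalizing n with
  | nil => simp
  | cons x xs ih =>
    simp only [List.foldl_cons, List.filter_cons]
    by_cases h : PySem.Int.mod x 2 = 0
    · simp only [h, decide_true, if_true, ih, List.length_cons]
      push_cast; ring
    · simp only [h, decide_false, Bool.false_eq_true, if_false, ih]

theorem find?_reverse_eq_getLast?_filter (arr : List Int) (p : Int → Bool) :
    arr.reverse.find? p = (arr.filter p).getLast? := by
  rw [← List.head?_filter, List.filter_reverse, List.head?_reverse]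

-- ===== VERDICT (by name: the statement is the Claim_ definition above) =====
theorem get_spec : Claim_equal_get := by
  intro arr _ hpre
  unfold Spec_get _root_.get get_alt
  simp only [getStep_inv, Option.or_none, zero_add, count_inv,
    find?_reverse_eq_getLast?_filter]
  by_cases h1 : ((arr.filter (fun i => PySem.Int.mod i 2 = 0)).length : Int) = 1
  · have hlen : (arr.filter (fun i => PySem.Int.mod i 2 = 0)).length = 1 := by exact_mod_cast h1
    obtain ⟨x, hx⟩ := List.length_eq_one_iff.mp hlen
    rw [if_pos h1, if_pos h1, ← List.head?_filter, hx]
    rfl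
  · have hlen : (arr.filter (fun i => PySem.Int.mod i 2 = 0)).length ≠ 1 := by
      intro hc; exact h1 (by exact_mod_cast hc)
    have hsame : (fun i : Int => PySem.Int.mod i 2 = 0) = (fun i : Int => i % 2 = 0) := by
      funext i; simp
    have hodne : arr.filter (fun i => PySem.Int.mod i 2 ≠ 0) ≠ [] := by
      rcases hpre with hp | ⟨i, hi, hmod⟩
      · exfalso; apply hlen; simpa [hsame] using hp
      · refine List.ne_nil_of_mem (a := i) ?_
        exact List.mem_filter.mpr ⟨hi, by simp [hmod]⟩
    rw [if_neg h1, if_neg h1, List.getLast?_eq_some_getLast hodne]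
    rfl
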